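-- pv_equiv track=rewrite | github.com/kenthudoan/Lunar | backend/app/services/game_session.py | _resolve_canonical_name
-- ===== SOURCE A (Python) =====
-- def _resolve_canonical_name(short_name: str, all_names: list[str]) -> str:
--     """Resolve a potentially short name to its full canonical form.
--
--     E.g. 'ShortName' -> 'Full Canonical Name'.
--     Returns the original name if no better match is found.
--     """
--     lower = short_name.lower()
--     # Already a long name or exact match? Return as-is.
--     for full in all_names:
--         if full.lower() == lower:
--             return full
--     # Check if short_name is a substring of a longer known name
--     for full in all_names:
--         if lower in full.lower() and len(full) > len(short_name):
--             return full
--     return short_name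
-- ===== SOURCE B (Python) =====
-- def _resolve_canonical_name(short_name: str, all_names: list[str]) -> str:
--     """Single pass: return immediately on exact (case-insensitive) match,
--     otherwise remember the first longer name containing short_name."""
--     lower = short_name.lower()
--     candidate = None
--     for full in all_names:
--         fl = full.lower()
--         if fl == lower:
--             return full
--         if candidate is None and lower in fl and len(full) > len(short_name):
--             candidate = full
--     return candidate if candidate is not None else short_name
-- ===== Notes on version B (the rewrite author's own statement) =====
-- stated objective: alternative
-- what changed: Fuses A's two sequential scans into one pass that returns immediately on an exact case-insensitive match and stashes the first longer substring-containing name in a candidate variable.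
import Mathlib
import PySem

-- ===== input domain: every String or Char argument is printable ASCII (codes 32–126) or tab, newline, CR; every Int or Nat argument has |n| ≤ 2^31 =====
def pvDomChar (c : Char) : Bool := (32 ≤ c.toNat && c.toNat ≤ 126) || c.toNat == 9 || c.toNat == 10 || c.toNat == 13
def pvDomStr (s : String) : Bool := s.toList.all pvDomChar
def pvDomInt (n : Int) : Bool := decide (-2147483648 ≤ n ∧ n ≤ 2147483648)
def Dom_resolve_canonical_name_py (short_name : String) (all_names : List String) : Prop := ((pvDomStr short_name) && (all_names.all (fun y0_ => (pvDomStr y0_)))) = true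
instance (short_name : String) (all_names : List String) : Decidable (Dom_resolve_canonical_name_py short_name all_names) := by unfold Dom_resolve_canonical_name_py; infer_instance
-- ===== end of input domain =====

-- B fuses A's two sequential scans into one pass with a candidate variable; equivalence proved on all inputs (both are total).

-- ===== PORT A =====
-- first loop of A: 'for full in all_names: if full.lower() == lower: return full'
def pvAExact (lower : String) : List String → Option String
  | [] => none
  | full :: rest =>
    if PySem.Str.lower full = lower then some full else pvAExact lower rest

-- second loop of A: 'for full in all_names: if lower in full.lower() and len(full) > len(short_name): return full'
def pvASub (lower short_name : String) : List String → Option String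
  | [] => none
  | full :: rest =>
    if PySem.Str.isIn lower (PySem.Str.lower full) && decide (PySem.Str.len short_name < PySem.Str.len full)
    then some full else pvASub lower short_name rest

def resolve_canonical_name_py (short_name : String) (all_names : List String) : String :=
  let lower := PySem.Str.lower short_name
  match pvAExact lower all_names with
  | some full => full
  | none =>
    match pvASub lower short_name all_names with
    | some full => full
    | none => short_name

-- ===== PORT B =====
-- B's single loop: return on exact match, else thread the candidate accumulator
def pvBLoop (lower short_name : String) (cand : Option String) : List String → String
  | [] => match cand with | some c => c | none => short_name
  | full :: rest =>
    let fl := PySem.Str.lower full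
    if fl = lower then full
    else
      pvBLoop lower short_name
        (if cand.isNone && PySem.Str.isIn lower fl && decide (PySem.Str.len short_name < PySem.Str.len full)
         then some full else cand) rest

def resolve_canonical_name_py_alt (short_name : String) (all_names : List String) : String :=
  pvBLoop (PySem.Str.lower short_name) short_name none all_names

-- ===== PRECONDITION & SPEC =====
def Spec_resolve_canonical_name_py (short_name : String) (all_names : List String) (out : String) : Prop := out = resolve_canonical_name_py_alt short_name all_names
instance (short_name : String) (all_names : List String) (out : String) : Decidable (Spec_resolve_canonical_name_py short_name all_names out) := by unfold Spec_resolve_canonical_name_py; infer_instance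

-- ===== CLAIM (what is proved, stated in full; the proofs are below) =====
def Claim_equal_resolve_canonical_name_py : Prop := ∀ (short_name : String) (all_names : List String), Dom_resolve_canonical_name_py short_name all_names → Spec_resolve_canonical_name_py short_name all_names (resolve_canonical_name_py short_name all_names)

-- ===== LEMMAS AND PROOFS =====

-- loop invariant: B's fused loop equals 'exact match first, else the pending candidate, else the first substring match, else short_name'
theorem pvBLoop_eq (lower short_name : String) (l : List String) :
    ∀ cand : Option String,
      pvBLoop lower short_name cand l =
        match pvAExact lower l with
        | some f => f
        | none =>
          match cand with
          | some c => c
          | none =>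
            match pvASub lower short_name l with
            | some f => f
            | none => short_name := by
  induction l with
  | nil => intro cand; cases cand <;> rfl
  | cons full rest ih =>
    intro cand
    by_cases hx : PySem.Str.lower full = lower
    · cases cand <;> simp [pvBLoop, pvAExact, hx]
    · cases cand with
      | some c => simp [pvBLoop, pvAExact, hx, ih]
      | none =>
        by_cases hs : (PySem.Str.isIn lower (PySem.Str.lower full) && decide (PySem.Str.len short_name < PySem.Str.len full)) = true
        · simp only [pvBLoop, pvAExact, pvASub, hx, Option.isNone_none, Bool.true_and, hs, ih]
          cases pvAExact lower rest <;> rfl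
        · simp only [pvBLoop, pvAExact, pvASub, hx, Option.isNone_none, Bool.true_and, hs, ih]
          simp

-- ===== VERDICT (by name: the statement is the Claim_ definition above) =====
theorem resolve_canonical_name_py_spec : Claim_equal_resolve_canonical_name_py := by
  intro short_name all_names _
  unfold Spec_resolve_canonical_name_py resolve_canonical_name_py resolve_canonical_name_py_alt
  rw [pvBLoop_eq]
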